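-- pv_equiv track=rewrite | github.com/GabrielDamian/CVEWatchdog | PyModel/src/v1/Stage 2.py | tokenize_complex_string
-- ===== SOURCE A (Python) =====
-- def tokenize_complex_string(sir, separatori):
--
--     tokens = []  # Lista pentru a stoca token-urile rezultate
--     start = 0  # Variabila pentru a urmări începutul fiecărui slice
--
--     for i, caracter in enumerate(sir):
--         if caracter in separatori:
--             # Dacă întâlnim un separator, adăugăm slice-ul de la start până la indexul actual în lista de token-uri
--             tokens.append(sir[start:i])
--             start = i + 1  # Actualizăm startul pentru următorul slice
--
--     # Adăugăm ultimul slice, dacă există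
--     if start < len(sir):
--         tokens.append(sir[start:])
--
--     return tokens
-- ===== SOURCE B (Python) =====
-- def tokenize_complex_string(sir, separatori):
--     # Character-accumulator tokenizer: grow a buffer of chars instead of tracking a start index and slicing.
--     tokens = []
--     current = []
--     for ch in sir:
--         if ch in separatori:
--             tokens.append(''.join(current))
--             current = []
--         else:
--             current.append(ch)
--     if current:
--         tokens.append(''.join(current))
--     return tokens
-- ===== Notes on version B (the rewrite author's own statement) =====
-- stated objective: idiomatic
-- what changed: Replaces the start-index-and-slice scanner with a character-accumulator tokenizer that grows a buffer and flushes it at each separator.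
import Mathlib
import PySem

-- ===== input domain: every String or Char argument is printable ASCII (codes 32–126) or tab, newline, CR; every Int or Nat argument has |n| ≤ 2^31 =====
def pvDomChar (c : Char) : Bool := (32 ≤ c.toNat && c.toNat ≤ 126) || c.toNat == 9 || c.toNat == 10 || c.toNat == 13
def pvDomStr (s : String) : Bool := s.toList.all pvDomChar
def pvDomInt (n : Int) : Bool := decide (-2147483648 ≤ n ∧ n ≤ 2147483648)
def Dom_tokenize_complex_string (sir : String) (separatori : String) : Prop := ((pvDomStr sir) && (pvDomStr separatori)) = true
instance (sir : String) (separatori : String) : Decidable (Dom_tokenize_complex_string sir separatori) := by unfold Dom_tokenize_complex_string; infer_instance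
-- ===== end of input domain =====

-- B replaces A's start-index-and-slice scanner by a character-accumulator tokenizer (idiomatic; same cost).

-- ===== PORT A =====
-- loop body of A: 'if caracter in separatori: tokens.append(sir[start:i]); start = i + 1'
def tcsStepA (sir separatori : String) (st : List String × Int) (p : Int × Char) : List String × Int :=
  if PySem.Chars.isIn [p.2] separatori.toList then
    (st.1 ++ [PySem.Str.slice sir (some st.2) (some p.1)], p.1 + 1)
  else st

def tokenize_complex_string (sir : String) (separatori : String) : List String :=
  let st := (PySem.List.enumerate sir.toList 0).foldl (tcsStepA sir separatori) ([], 0)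
  if st.2 < PySem.Str.len sir then st.1 ++ [PySem.Str.slice sir (some st.2) none] else st.1

-- ===== PORT B =====
-- loop body of B: flush the buffer at a separator, otherwise grow it
def tcsStepB (separatori : String) (st : List String × List Char) (ch : Char) : List String × List Char :=
  if PySem.Chars.isIn [ch] separatori.toList then (st.1 ++ [String.ofList st.2], [])
  else (st.1, st.2 ++ [ch])

def tokenize_complex_string_alt (sir : String) (separatori : String) : List String :=
  let st := sir.toList.foldl (tcsStepB separatori) ([], [])
  if st.2.isEmpty then st.1 else st.1 ++ [String.ofList st.2]

-- ===== PRECONDITION & SPEC =====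
def Spec_tokenize_complex_string (sir : String) (separatori : String) (out : List String) : Prop := out = tokenize_complex_string_alt sir separatori
instance (sir : String) (separatori : String) (out : List String) : Decidable (Spec_tokenize_complex_string sir separatori out) := by unfold Spec_tokenize_complex_string; infer_instance

-- ===== CLAIM (what is proved, stated in full; the proofs are below) =====
def Claim_equal_tokenize_complex_string : Prop := ∀ (sir : String) (separatori : String), Dom_tokenize_complex_string sir separatori → Spec_tokenize_complex_string sir separatori (tokenize_complex_string sir separatori)

-- ===== LEMMAS AND PROOFS =====

-- A's slice sir[s:k] (0 ≤ s ≤ k) is exactly B's buffer (cs.drop s).take (k - s)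
theorem tcs_slice_eq (sir : String) (s k : Nat) :
    PySem.Str.slice sir (some (s : Int)) (some (k : Int))
      = String.ofList ((sir.toList.drop s).take (k - s)) := by
  apply String.toList_injective
  simp [PySem.Str.toList_slice, PySem.List.slice_natCast]

-- loop invariant: A's (tokens, start) state and B's (tokens, buffer) state track each other,
-- with buffer = sir[start:i]
theorem tcs_inv (sir separatori : String) :
    ∀ (rest : List Char) (k s : Nat) (toks : List String),
      rest = sir.toList.drop k → s ≤ k →
      ∃ s' : Nat, s' ≤ k + rest.length ∧
        (PySem.List.enumerate rest (k : Int)).foldl (tcsStepA sir separatori) (toks, (s : Int))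
          = ((rest.foldl (tcsStepB separatori) (toks, (sir.toList.drop s).take (k - s))).1, (s' : Int)) ∧
        (rest.foldl (tcsStepB separatori) (toks, (sir.toList.drop s).take (k - s))).2
          = (sir.toList.drop s').take (k + rest.length - s') := by
  intro rest
  induction rest with
  | nil =>
    intro k s toks _ hs
    exact ⟨s, by omega, by simp [PySem.List.enumerate], by simp⟩
  | cons c rest ih =>
    intro k s toks hrest hs
    have hk : k < sir.toList.length := by
      by_contra h
      simp [List.drop_eq_nil_of_le (by omega : sir.toList.length ≤ k)] at hrest
    have hget : sir.toList[k]'hk = c := by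
      have h0 : (sir.toList.drop k)[0]'(by rw [← hrest]; simp) = c := by
        simp [← hrest]
      rw [List.getElem_drop] at h0
      simpa using h0
    have hrest' : rest = sir.toList.drop (k + 1) := by
      have h := congrArg List.tail hrest
      simpa [List.tail_drop] using h
    rw [PySem.List.enumerate_cons]
    by_cases hc : PySem.Chars.isIn [c] separatori.toList
    · -- separator: A emits sir[s:k], B flushes the buffer
      have hA : tcsStepA sir separatori (toks, (s : Int)) ((k : Int), c)
          = (toks ++ [String.ofList ((sir.toList.drop s).take (k - s))], ((k + 1 : Nat) : Int)) := by
        simp [tcsStepA, hc, tcs_slice_eq]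
      have hB : tcsStepB separatori (toks, (sir.toList.drop s).take (k - s)) c
          = (toks ++ [String.ofList ((sir.toList.drop s).take (k - s))], []) := by
        simp [tcsStepB, hc]
      obtain ⟨s', h1, h2, h3⟩ := ih (k + 1) (k + 1)
        (toks ++ [String.ofList ((sir.toList.drop s).take (k - s))]) hrest' (le_refl _)
      refine ⟨s', by simpa using by omega, ?_, ?_⟩
      · simp only [List.foldl_cons, hA, hB]
        have : ((k : Int) + 1) = ((k + 1 : Nat) : Int) := by push_cast; ring
        rw [this]
        simpa using h2
      · simp only [List.foldl_cons, hB]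
        simpa [Nat.add_assoc, Nat.add_comm 1 rest.length] using h3
    · -- ordinary character: A keeps (toks, start), B appends c to the buffer
      have hbuf : (sir.toList.drop s).take (k - s) ++ [c] = (sir.toList.drop s).take (k + 1 - s) := by
        have hlen : k - s < (sir.toList.drop s).length := by
          rw [List.length_drop]; omega
        have : (sir.toList.drop s)[k - s]'hlen = c := by
          rw [List.getElem_drop]
          have : s + (k - s) = k := by omega
          simp_rw [this]; exact hget
        have h2 : (sir.toList.drop s).take (k - s + 1)
            = (sir.toList.drop s).take (k - s) ++ [(sir.toList.drop s)[k - s]'hlen] := by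
          rw [List.take_add_one]; simp
        have h3 : k + 1 - s = k - s + 1 := by omega
        rw [h3, h2, this]
      have hA : tcsStepA sir separatori (toks, (s : Int)) ((k : Int), c) = (toks, (s : Int)) := by
        simp [tcsStepA, hc]
      have hB : tcsStepB separatori (toks, (sir.toList.drop s).take (k - s)) c
          = (toks, (sir.toList.drop s).take (k + 1 - s)) := by
        simp [tcsStepB, hc, hbuf]
      obtain ⟨s', h1, h2, h3⟩ := ih (k + 1) s toks hrest' (by omega)
      refine ⟨s', by simpa using by omega, ?_, ?_⟩
      · simp only [List.foldl_cons, hA, hB]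
        have : ((k : Int) + 1) = ((k + 1 : Nat) : Int) := by push_cast; ring
        rw [this]
        simpa using h2
      · simp only [List.foldl_cons, hB]
        simpa [Nat.add_assoc, Nat.add_comm 1 rest.length] using h3

-- ===== VERDICT (by name: the statement is the Claim_ definition above) =====
theorem tokenize_complex_string_spec : Claim_equal_tokenize_complex_string := by
  intro sir separatori _
  unfold Spec_tokenize_complex_string tokenize_complex_string tokenize_complex_string_alt
  obtain ⟨s', h1, h2, h3⟩ := tcs_inv sir separatori sir.toList 0 0 [] (by simp) (le_refl 0)
  simp only [Nat.zero_add, Nat.cast_zero, Nat.sub_zero, List.drop_zero, List.take_zero] at h1 h2 h3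
  have hdrop : (sir.toList.drop s').take (sir.toList.length - s') = sir.toList.drop s' := by
    apply List.take_of_length_le; simp
  rw [hdrop] at h3
  simp only [h2]
  have hlen : PySem.Str.len sir = (sir.toList.length : Int) := PySem.Str.len_eq sir
  have hL : sir.toList.length = sir.length := by simp
  by_cases h : s' < sir.toList.length
  · have hne : ¬ (sir.toList.drop s').isEmpty := by
      simp [List.isEmpty_iff, List.drop_eq_nil_iff]; omega
    have hsl : PySem.Str.slice sir (some (s' : Int)) none = String.ofList (sir.toList.drop s') := by
      apply String.toList_injective
      simp [PySem.Str.toList_slice, PySem.List.slice_from_natCast]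
    simp [hne, h3, hsl]
    omega
  · have hemp : (sir.toList.drop s').isEmpty := by
      simp [List.isEmpty_iff, List.drop_eq_nil_iff]; omega
    simp [hemp, h3]
    omega
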